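-- pv_equiv track=rewrite | github.com/hfeng620-cmd/Code_Set | Tools_Utilities/final_recover.py | find_main_module
-- ===== SOURCE A (Python) =====
-- def find_main_module(entries):
--     """Find the main Video_Player module."""
--     # Look for exact match first
--     for entry in entries:
--         if entry['name'] == 'Video_Player':
--             return entry
--
--     # Look for case-insensitive match
--     for entry in entries:
--         if 'video' in entry['name'].lower() and 'player' in entry['name'].lower():
--             return entry
--
--     # Look for any module that might be the main one
--     for entry in entries:
--         if not entry['name'].startswith('PyQt') and not entry['name'].startswith('_'):
--             return entry
--
--     return None
-- ===== SOURCE B (Python) =====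
-- def find_main_module(entries):
--     """Find the main Video_Player module (single pass with candidate slots)."""
--     tier2 = None
--     tier3 = None
--     for entry in entries:
--         name = entry['name']
--         if name == 'Video_Player':
--             return entry
--         low = name.lower()
--         if tier2 is None and 'video' in low and 'player' in low:
--             tier2 = entry
--         if tier3 is None and not name.startswith('PyQt') and not name.startswith('_'):
--             tier3 = entry
--     return tier2 if tier2 is not None else tier3
-- ===== Notes on version B (the rewrite author's own statement) =====
-- stated objective: alternative
-- what changed: Replaces A's three sequential scans over the list with a single pass that keeps one candidate per lower-priority tier and returns an exact match immediately.
import Mathlib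
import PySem

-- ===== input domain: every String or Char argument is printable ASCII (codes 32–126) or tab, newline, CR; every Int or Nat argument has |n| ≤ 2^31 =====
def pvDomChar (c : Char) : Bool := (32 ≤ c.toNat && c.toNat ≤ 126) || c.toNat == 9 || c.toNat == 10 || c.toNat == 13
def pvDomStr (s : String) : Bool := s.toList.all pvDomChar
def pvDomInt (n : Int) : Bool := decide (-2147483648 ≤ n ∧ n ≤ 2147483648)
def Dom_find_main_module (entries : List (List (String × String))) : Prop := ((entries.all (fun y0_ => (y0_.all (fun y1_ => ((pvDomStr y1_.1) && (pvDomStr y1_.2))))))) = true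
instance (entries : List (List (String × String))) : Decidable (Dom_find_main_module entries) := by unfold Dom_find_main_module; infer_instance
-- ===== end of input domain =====

-- B makes one pass keeping a candidate slot per lower tier instead of A's three scans.

-- entry['name']; Pre_ guarantees the key is present (Python raises KeyError otherwise)
def pvName (e : List (String × String)) : String := PySem.Dict.getD (PySem.Dict.mk e) "name" ""

-- the three tier tests, shared verbatim by both ports
def pvTier1 (e : List (String × String)) : Bool := pvName e == "Video_Player"
def pvTier2 (e : List (String × String)) : Bool :=
  PySem.Str.isIn "video" (PySem.Str.lower (pvName e)) &&
  PySem.Str.isIn "player" (PySem.Str.lower (pvName e))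
def pvTier3 (e : List (String × String)) : Bool :=
  !PySem.Str.startswith (pvName e) "PyQt" && !PySem.Str.startswith (pvName e) "_"

-- ===== PORT A =====
-- three sequential for-loops, each returning the first match, then None
def find_main_module (entries : List (List (String × String))) : Option (List (String × String)) :=
  match entries.find? pvTier1 with
  | some e => some e
  | none =>
    match entries.find? pvTier2 with
    | some e => some e
    | none =>
      match entries.find? pvTier3 with
      | some e => some e
      | none => none

-- ===== PORT B =====
-- single pass carrying the two candidate slots; returns immediately on the exact match
def pvAltGo : List (List (String × String)) → Option (List (String × String)) →
    Option (List (String × String)) → Option (List (String × String))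
  | [], t2, t3 => if t2.isSome then t2 else t3
  | e :: rest, t2, t3 =>
    if pvTier1 e then some e
    else
      let t2' := if t2.isNone && pvTier2 e then some e else t2
      let t3' := if t3.isNone && pvTier3 e then some e else t3
      pvAltGo rest t2' t3'

def find_main_module_alt (entries : List (List (String × String))) : Option (List (String × String)) :=
  pvAltGo entries none none

-- ===== PRECONDITION & SPEC =====
-- Pre_ excludes exactly the inputs where A (and B) raise KeyError: an entry dict lacking the 'name' key
-- that is not preceded by an exact 'Video_Player' match (both programs return before reaching it otherwise).
def Pre_find_main_module (entries : List (List (String × String))) : Prop :=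
  ((entries.takeWhile (fun e => !pvTier1 e)).all
    (fun e => ((PySem.Dict.mk e).get? "name").isSome)) = true
instance (entries : List (List (String × String))) : Decidable (Pre_find_main_module entries) := by
  unfold Pre_find_main_module; infer_instance

def pvWitness_find_main_module : (List (List (String × String))) :=
  [[("name", "PyQt5")], [("name", "My Video Player")]]

def Spec_find_main_module (entries : List (List (String × String))) (out : Option (List (String × String))) : Prop := out = find_main_module_alt entries
instance (entries : List (List (String × String))) (out : Option (List (String × String))) : Decidable (Spec_find_main_module entries out) := by unfold Spec_find_main_module; infer_instance

-- ===== CLAIM (what is proved, stated in full; the proofs are below) =====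
def Claim_equal_find_main_module : Prop := ∀ (entries : List (List (String × String))), Dom_find_main_module entries → Pre_find_main_module entries → Spec_find_main_module entries (find_main_module entries)

-- ===== LEMMAS AND PROOFS =====

-- characterisation of B's loop: priority tiers, with the slots seeding tiers 2 and 3
theorem pvAltGo_eq (l : List (List (String × String)))
    (t2 t3 : Option (List (String × String))) :
    pvAltGo l t2 t3 =
      match l.find? pvTier1 with
      | some e => some e
      | none =>
        match (if t2.isSome then t2 else l.find? pvTier2) with
        | some e => some e
        | none => if t3.isSome then t3 else l.find? pvTier3 := by
  induction l generalizing t2 t3 with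
  | nil => cases t2 <;> cases t3 <;> simp [pvAltGo]
  | cons e rest ih =>
    by_cases h1 : pvTier1 e
    · rw [List.find?_cons_of_pos h1]
      simp only [pvAltGo, if_pos h1]
    · rw [List.find?_cons_of_neg h1]
      simp only [pvAltGo, if_neg h1]
      rw [ih]
      by_cases h2 : pvTier2 e <;> by_cases h3 : pvTier3 e
      · rw [List.find?_cons_of_pos h2, List.find?_cons_of_pos h3]
        cases t2 <;> cases t3 <;> cases hr : rest.find? pvTier1 <;> simp [h2, h3, hr]
      · rw [List.find?_cons_of_pos h2, List.find?_cons_of_neg h3]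
        cases t2 <;> cases t3 <;> cases hr : rest.find? pvTier1 <;> simp [h2, h3, hr]
      · rw [List.find?_cons_of_neg h2, List.find?_cons_of_pos h3]
        cases t2 <;> cases t3 <;> cases hr : rest.find? pvTier1 <;> simp [h2, h3, hr]
      · rw [List.find?_cons_of_neg h2, List.find?_cons_of_neg h3]
        cases t2 <;> cases t3 <;> cases hr : rest.find? pvTier1 <;> simp [h2, h3, hr]

-- ===== VERDICT (by name: the statement is the Claim_ definition above) =====
theorem find_main_module_spec : Claim_equal_find_main_module := by
  intro entries _ _
  unfold Spec_find_main_module find_main_module find_main_module_alt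
  rw [pvAltGo_eq]
  simp only [Option.isSome_none, Bool.false_eq_true, if_false]
  cases entries.find? pvTier1 <;> [skip; rfl]
  cases entries.find? pvTier2 <;> [skip; rfl]
  cases entries.find? pvTier3 <;> rfl
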